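-- pv_equiv track=rewrite | github.com/Suprabhash/Quant | Research/RL/Deprecated/V3-V4/V1.py | get_all_states
-- ===== SOURCE A (Python) =====
-- import itertools
--
-- def get_all_states(price_states_value,  fisher_states_value, state_lookback, UseFisherinStateSpace):
--     states = []
--     if not(UseFisherinStateSpace):
--         fisher_states_value = []
--     for p, _ in price_states_value.items():
--         fisher_states = []
--         for i in range(len(fisher_states_value)):
--             fisher_states.append(list(fisher_states_value[i].items()))
--         fisher_states = list(itertools.product(*fisher_states))
--         for fs in fisher_states:
--             fisher_state = ''
--             for f in fs:
--                 c, _ = f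
--                 fisher_state =  fisher_state + str(c)
--             states.append(str(p)+fisher_state)
--     states = list(itertools.product(*[states for i in range(state_lookback)]))
--     states = [''.join(state) for state in states]
--     return states
-- ===== SOURCE B (Python) =====
-- import itertools
--
-- def get_all_states(price_states_value, fisher_states_value, state_lookback, UseFisherinStateSpace):
--     dims = [[str(k) for k in price_states_value.keys()]]
--     if UseFisherinStateSpace:
--         dims += [[str(k) for k in d.keys()] for d in fisher_states_value]
--     if state_lookback > 0 and not all(dims):
--         return []
--     all_dims = dims * state_lookback
--     return list(map(''.join, itertools.product(*all_dims)))
-- ===== Notes on version B (the rewrite author's own statement) =====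
-- stated objective: simpler
-- what changed: Replaces A's two-stage construction (per-price-key inner product of fisher item lists appended into a base list, then a second product of that list with itself state_lookback times) by one flat itertools.product over the dimension list [price keys]+[fisher key lists] replicated state_lookback times (with an early [] when a dimension is empty and state_lookback > 0), joining each combination directly.
import Mathlib
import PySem

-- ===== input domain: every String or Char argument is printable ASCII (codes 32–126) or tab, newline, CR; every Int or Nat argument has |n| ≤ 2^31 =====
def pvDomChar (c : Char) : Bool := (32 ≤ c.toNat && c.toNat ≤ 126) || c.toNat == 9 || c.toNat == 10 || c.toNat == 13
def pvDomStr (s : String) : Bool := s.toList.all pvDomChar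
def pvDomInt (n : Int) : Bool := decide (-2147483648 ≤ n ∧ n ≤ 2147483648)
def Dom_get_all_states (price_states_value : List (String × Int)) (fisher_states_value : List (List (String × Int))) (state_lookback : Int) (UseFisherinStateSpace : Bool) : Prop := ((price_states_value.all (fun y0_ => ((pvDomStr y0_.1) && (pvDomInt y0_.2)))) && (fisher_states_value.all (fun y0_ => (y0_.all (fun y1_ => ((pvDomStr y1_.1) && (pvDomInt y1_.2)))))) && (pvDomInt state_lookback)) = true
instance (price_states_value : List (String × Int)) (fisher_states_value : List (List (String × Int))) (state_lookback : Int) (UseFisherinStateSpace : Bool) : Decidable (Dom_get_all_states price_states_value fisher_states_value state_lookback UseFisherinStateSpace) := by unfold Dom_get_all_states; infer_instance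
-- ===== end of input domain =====

-- B collapses A's two-stage construction (per-price inner product, then a second product of the
-- base list with itself) into ONE flat itertools.product over the replicated dimension list;
-- objective: simpler (same output cost, no intermediate base list).

-- itertools.product(*dims) in Python's order (leftmost dimension varies slowest); shared library
-- helper, used by both ports exactly where their Python calls itertools.product.
def pyProduct {α : Type} (dims : List (List α)) : List (List α) :=
  dims.reverse.foldl (fun acc d => d.flatMap (fun x => acc.map (x :: ·))) [[]]

-- ===== PORT A =====
-- literal transliteration of A: build `states` over price keys × product of fisher item-lists,
-- then product of [states]*state_lookback and join.  str(p)/str(c) on the String keys = identity.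
def get_all_states (price_states_value : List (String × Int)) (fisher_states_value : List (List (String × Int))) (state_lookback : Int) (UseFisherinStateSpace : Bool) : List String :=
  let fisher_states_value' := if !UseFisherinStateSpace then [] else fisher_states_value
  let states : List String :=
    (price_states_value.map Prod.fst).flatMap (fun p =>
      -- inner loop: fisher_states = [fisher_states_value[i].items() for i], then product
      let fisher_states := pyProduct fisher_states_value'
      fisher_states.map (fun fs =>
        let fisher_state := fs.foldl (fun acc f => acc ++ f.1) ""
        p ++ fisher_state))
  -- range(state_lookback) has (state_lookback).toNat elements (empty when negative)
  let prods := pyProduct (List.replicate state_lookback.toNat states)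
  prods.map (fun state => String.join state)

-- ===== PORT B =====
-- literal transliteration of B: one dimension list D = [price keys] (+ fisher key lists when the
-- flag is set; str(k) on a String key is the key itself), an early [] when some dimension is empty
-- and state_lookback > 0, else dims replicated state_lookback times, one flat product, join each.
def get_all_states_alt (price_states_value : List (String × Int)) (fisher_states_value : List (List (String × Int))) (state_lookback : Int) (UseFisherinStateSpace : Bool) : List String :=
  let dims : List (List String) :=
    if UseFisherinStateSpace then
      (price_states_value.map Prod.fst) :: fisher_states_value.map (fun d => d.map Prod.fst)
    else
      [price_states_value.map Prod.fst]
  if 0 < state_lookback ∧ [] ∈ dims then []   -- `state_lookback > 0 and not all(dims)`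
  else
    let all_dims := (List.replicate state_lookback.toNat dims).flatten   -- dims * state_lookback
    (pyProduct all_dims).map (fun combo => String.join combo)

-- ===== PRECONDITION & SPEC =====
def Spec_get_all_states (price_states_value : List (String × Int)) (fisher_states_value : List (List (String × Int))) (state_lookback : Int) (UseFisherinStateSpace : Bool) (out : List String) : Prop := out = get_all_states_alt price_states_value fisher_states_value state_lookback UseFisherinStateSpace
instance (price_states_value : List (String × Int)) (fisher_states_value : List (List (String × Int))) (state_lookback : Int) (UseFisherinStateSpace : Bool) (out : List String) : Decidable (Spec_get_all_states price_states_value fisher_states_value state_lookback UseFisherinStateSpace out) := by unfold Spec_get_all_states; infer_instance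

-- ===== CLAIM (what is proved, stated in full; the proofs are below) =====
def Claim_equal_get_all_states : Prop := ∀ (price_states_value : List (String × Int)) (fisher_states_value : List (List (String × Int))) (state_lookback : Int) (UseFisherinStateSpace : Bool), Dom_get_all_states price_states_value fisher_states_value state_lookback UseFisherinStateSpace → Spec_get_all_states price_states_value fisher_states_value state_lookback UseFisherinStateSpace (get_all_states price_states_value fisher_states_value state_lookback UseFisherinStateSpace)

-- ===== LEMMAS AND PROOFS =====

theorem pyProduct_cons {α : Type} (d : List α) (ds : List (List α)) :
    pyProduct (d :: ds) = d.flatMap (fun x => (pyProduct ds).map (x :: ·)) := by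
  simp only [pyProduct, List.reverse_cons, List.foldl_append, List.foldl_cons, List.foldl_nil]

theorem foldl_str_append (l : List String) (a : String) :
    l.foldl (· ++ ·) a = a ++ l.foldl (· ++ ·) "" := by
  induction l generalizing a with
  | nil => simp
  | cons x xs ih => simp only [List.foldl_cons]; rw [ih ("" ++ x), ih (a ++ x)]; simp [String.append_assoc]

theorem join_cons (x : String) (s : List String) : String.join (x :: s) = x ++ String.join s := by
  simp only [String.join, List.foldl_cons]; rw [foldl_str_append]; rfl

-- the joined product of a dimension list
def pvJ (ds : List (List String)) : List String := (pyProduct ds).map String.join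

-- string cross product
def pvCross (xs ys : List String) : List String := xs.flatMap (fun x => ys.map (x ++ ·))

theorem pvJ_nil : pvJ [] = [""] := rfl

theorem pvJ_cons (d : List String) (ds : List (List String)) :
    pvJ (d :: ds) = pvCross d (pvJ ds) := by
  rw [pvJ, pyProduct_cons]
  simp [pvCross, pvJ, List.map_flatMap, List.map_map, Function.comp_def, join_cons]

theorem pvCross_empty_left (ys : List String) : pvCross [""] ys = ys := by
  simp [pvCross]

theorem pvCross_assoc (a b c : List String) :
    pvCross (pvCross a b) c = pvCross a (pvCross b c) := by
  simp [pvCross, List.flatMap_assoc, List.map_flatMap, List.flatMap_map, List.map_map,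
    Function.comp_def, String.append_assoc]

theorem pvJ_append (ds1 ds2 : List (List String)) :
    pvJ (ds1 ++ ds2) = pvCross (pvJ ds1) (pvJ ds2) := by
  induction ds1 with
  | nil => simp [pvJ_nil, pvCross_empty_left]
  | cons d ds ih => simp only [List.cons_append, pvJ_cons, ih, pvCross_assoc]

theorem pyProduct_map {α β : Type} (f : α → β) (ds : List (List α)) :
    pyProduct (ds.map (List.map f)) = (pyProduct ds).map (List.map f) := by
  induction ds with
  | nil => rfl
  | cons d ds ih =>
      rw [List.map_cons, pyProduct_cons, pyProduct_cons, ih]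
      simp [List.map_flatMap, List.flatMap_map, List.map_map, Function.comp_def]

-- A's base list of single-step states equals the joined product of B's dimension list
theorem base_eq (pvs : List (String × Int)) (fvs : List (List (String × Int))) :
    (pvs.map Prod.fst).flatMap (fun p =>
        (pyProduct fvs).map (fun fs => p ++ fs.foldl (fun acc f => acc ++ f.1) "")) =
      pvJ ((pvs.map Prod.fst) :: fvs.map (fun d => d.map Prod.fst)) := by
  rw [pvJ_cons]
  simp only [pvCross, pvJ, pyProduct_map, List.map_map, Function.comp_def]
  congr 1; funext p; congr 1; funext fs
  have : fs.foldl (fun acc f => acc ++ f.1) "" = String.join (fs.map Prod.fst) := by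
    rw [← List.foldl_map]; rfl
  rw [this]

-- both final stages are the k-fold cross of the same base list
theorem repl_eq (L : List String) (D : List (List String)) (h : L = pvJ D) (k : Nat) :
    (pyProduct (List.replicate k L)).map String.join = pvJ ((List.replicate k D).flatten) := by
  induction k with
  | zero => rfl
  | succ n ih =>
      have h1 : (List.replicate (n+1) L) = L :: List.replicate n L := rfl
      have h2 : (List.replicate (n+1) D).flatten = D ++ (List.replicate n D).flatten := rfl
      show pvJ (List.replicate (n+1) L) = _
      rw [h1, h2, pvJ_cons, pvJ_append, ← h, ← ih]; rfl

theorem pyProduct_nil_mem {α : Type} (ds : List (List α)) (h : [] ∈ ds) : pyProduct ds = [] := by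
  induction ds with
  | nil => cases h
  | cons d ds ih =>
      rw [pyProduct_cons]
      rcases List.mem_cons.mp h with h | h
      · subst h; rfl
      · simp [ih h]

-- the final stage, guard included
theorem main_eq (L : List String) (D : List (List String)) (h : L = pvJ D) (lb : Int) :
    (pyProduct (List.replicate lb.toNat L)).map String.join =
      (if 0 < lb ∧ [] ∈ D then []
       else (pyProduct ((List.replicate lb.toNat D).flatten)).map String.join) := by
  split_ifs with hg
  · obtain ⟨hlb, hmem⟩ := hg
    have hL : L = [] := by rw [h, pvJ, pyProduct_nil_mem D hmem]; rfl
    obtain ⟨m, hm⟩ : ∃ m, lb.toNat = m + 1 := ⟨lb.toNat - 1, by omega⟩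
    rw [hL, hm, pyProduct_nil_mem _ (by simp [List.replicate_succ])]
    rfl
  · exact repl_eq L D h lb.toNat

-- ===== VERDICT (by name: the statement is the Claim_ definition above) =====
theorem get_all_states_spec : Claim_equal_get_all_states := by
  intro pvs fvs lb uf _
  show get_all_states pvs fvs lb uf = get_all_states_alt pvs fvs lb uf
  unfold get_all_states get_all_states_alt
  cases uf with
  | false =>
      simp only [Bool.not_false, if_true, if_false, Bool.false_eq_true]
      exact main_eq _ _ (by simpa using base_eq pvs []) lb
  | true =>
      simp only [Bool.not_true, if_false, if_true, Bool.false_eq_true]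
      exact main_eq _ _ (base_eq pvs fvs) lb
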